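-- pv_equiv track=rewrite | github.com/learnforpractice/pyeos | libraries/chain/rpc_interface/eoslib.py | N
-- ===== SOURCE A (Python) =====
-- def char_to_symbol(c):
--     c = ord(c)
--     a = ord('a')
--     z = ord('z')
--     _1 = ord('1')
--     _5 = ord('5')
--
--     if c >= a and c <= z:
--         return (c - a) + 6
--
--     if c >= _1 and c <= _5:
--         return (c - _1) + 1
--     return 0
--
-- def N(name):
--     _len = len(name);
--     value = 0;
--
--     for i in range(13):
--         c = 0
--         if i < _len and i <= 12:
--             c = char_to_symbol(name[i])
--
--         if i < 12:
--             c &= 0x1f;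
--             c <<= 64-5*(i+1)
--         else:
--             c &= 0x0f;
--         value |= c;
--
--     return value
-- ===== SOURCE B (Python) =====
-- SYMBOL_INDEX = {ch: i for i, ch in enumerate(".12345abcdefghijklmnopqrstuvwxyz")}
--
-- def N(name):
--     # Table-driven bit-string assembly: pad the name to 13 chars with '.', look every
--     # char up in a precomputed index table, emit twelve 5-bit groups and one 4-bit
--     # group as a binary string, and parse it once with int(bits, 2).
--     padded = (name + "." * 13)[:13]
--     bits = "".join(format(SYMBOL_INDEX.get(ch, 0), "05b") for ch in padded[:12])
--     bits += format(SYMBOL_INDEX.get(padded[12], 0) % 16, "04b")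
--     return int(bits, 2)
-- ===== Notes on version B (the rewrite author's own statement) =====
-- stated objective: alternative
-- what changed: B replaces A's per-position range tests, masks and absolute-offset shift/OR packing with a precomputed char->index lookup table, dot-padding of the name to 13 chars, assembly of a fixed-width binary string (twelve 5-bit groups plus one 4-bit group) and a single int(bits, 2) parse.
import Mathlib
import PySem

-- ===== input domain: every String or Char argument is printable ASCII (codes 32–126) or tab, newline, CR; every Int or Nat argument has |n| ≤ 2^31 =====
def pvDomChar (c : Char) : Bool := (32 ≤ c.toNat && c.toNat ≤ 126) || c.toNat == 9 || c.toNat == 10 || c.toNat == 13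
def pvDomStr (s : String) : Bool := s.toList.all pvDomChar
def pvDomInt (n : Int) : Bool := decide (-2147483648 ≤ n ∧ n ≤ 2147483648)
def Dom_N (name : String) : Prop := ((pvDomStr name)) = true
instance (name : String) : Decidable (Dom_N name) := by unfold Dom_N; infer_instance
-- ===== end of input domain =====

-- B re-implements the EOS name encoder with a precomputed char->index table, dot-padding
-- to 13 characters, assembly of a fixed-width binary string and one int(bits, 2) parse,
-- instead of A's per-character range tests and absolute-offset shift/OR packing (alternative).

-- ===== PORT A =====
def charToSymbolA (ch : Char) : Int :=
  let c : Int := (ch.toNat : Int)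
  let a : Int := 97
  let z : Int := 122
  let d1 : Int := 49
  let d5 : Int := 53
  if c ≥ a ∧ c ≤ z then (c - a) + 6
  else if c ≥ d1 ∧ c ≤ d5 then (c - d1) + 1
  else 0

def N (name : String) : Int :=
  let cs := name.toList
  let len : Int := (cs.length : Int)
  (PySem.List.pyRange 0 13 1).foldl (fun value i =>
    let c : Int := if i < len ∧ i ≤ 12 then charToSymbolA (PySem.List.pyGetD cs i 'a') else 0
    let c : Int := if i < 12 then (PySem.Int.band c 0x1f) <<< (64 - 5*(i+1)).toNat
                   else PySem.Int.band c 0x0f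
    PySem.Int.bor value c) 0

-- ===== PORT B =====
-- table string ".12345abcdefghijklmnopqrstuvwxyz" as a char list
def symbolChars : List Char :=
  ['.', '1', '2', '3', '4', '5', 'a', 'b', 'c', 'd', 'e', 'f', 'g', 'h', 'i', 'j',
   'k', 'l', 'm', 'n', 'o', 'p', 'q', 'r', 's', 't', 'u', 'v', 'w', 'x', 'y', 'z']

-- SYMBOL_INDEX = {ch: i for i, ch in enumerate(".12345abcdefghijklmnopqrstuvwxyz")}
def symTable : PySem.Dict Char Int :=
  (PySem.List.enumerate symbolChars 0).foldl (fun d p => d.insert p.2 p.1) PySem.Dict.empty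

-- exact port of format(d, f"0{w}b") for 0 ≤ d (every call site passes 0 ≤ d):
-- binary digits (Nat.toDigits 2, most significant first, '0' for 0) left-padded with '0'
def fmtBin (w : Nat) (d : Int) : List Char :=
  let ds := Nat.toDigits 2 d.toNat
  List.replicate (w - ds.length) '0' ++ ds

def N_alt (name : String) : Int :=
  -- padded = (name + "." * 13)[:13]
  let padded := PySem.List.slice (name.toList ++ List.replicate 13 '.') none (some 13)
  -- bits = "".join(format(SYMBOL_INDEX.get(ch, 0), "05b") for ch in padded[:12])
  --        + format(SYMBOL_INDEX.get(padded[12], 0) % 16, "04b")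
  -- return int(bits, 2)   (final foldl = base-2 parse of the '0'/'1' string)
  ((PySem.List.slice padded none (some 12)).foldl
      (fun s ch => s ++ fmtBin 5 (PySem.Dict.getD symTable ch 0)) []
    ++ fmtBin 4 (PySem.Int.mod (PySem.Dict.getD symTable (PySem.List.pyGetD padded 12 '.') 0) 16)).foldl
    (fun acc ch => acc * 2 + (if ch == '1' then (1 : Int) else 0)) 0

-- ===== PRECONDITION & SPEC =====
def Spec_N (name : String) (out : Int) : Prop := out = N_alt name
instance (name : String) (out : Int) : Decidable (Spec_N name out) := by unfold Spec_N; infer_instance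

-- ===== CLAIM (what is proved, stated in full; the proofs are below) =====
def Claim_equal_N : Prop := ∀ (name : String), Dom_N name → Spec_N name (N name)

-- ===== LEMMAS AND PROOFS =====

theorem charToSymbolA_bound (ch : Char) : 0 ≤ charToSymbolA ch ∧ charToSymbolA ch < 32 := by
  unfold charToSymbolA
  dsimp only
  split_ifs with h1 h2 <;> omega

theorem dbound (P : Prop) [inst : Decidable P] (ch : Char) :
    0 ≤ (if P then charToSymbolA ch else 0) ∧ (if P then charToSymbolA ch else 0) < 32 := by
  split_ifs with h
  · exact charToSymbolA_bound ch
  · exact ⟨le_refl 0, by norm_num⟩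

theorem lor_two_pow_add (k q n : Nat) (h : n < 2^k) : q <<< k ||| n = q <<< k + n := by
  induction k generalizing n q with
  | zero =>
    interval_cases n
    simp
  | succ k ih =>
    have h2 : n / 2 < 2 ^ k := by
      have : 2 ^ (k+1) = 2 * 2 ^ k := by ring
      omega
    have hq : q <<< (k+1) = Nat.bit false (q <<< k) := by
      simp [Nat.shiftLeft_succ, Nat.bit, Nat.mul_comm]
    have hn : n = Nat.bit (decide (n % 2 = 1)) (n / 2) := by
      simp only [Nat.bit]
      rcases Nat.mod_two_eq_zero_or_one n with h'|h' <;> simp [h'] <;> omega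
    rw [hq, hn, Nat.lor_bit, ih _ _ h2]
    simp only [Nat.bit]
    rcases Nat.mod_two_eq_zero_or_one n with h'|h' <;> simp [h'] <;> ring

theorem orle (a b : Int) (k : Nat) (ha : 0 ≤ a) (hb : 0 ≤ b)
    (hd : (2:Int)^k ∣ a) (hlt : b < (2:Int)^k) : PySem.Int.bor a b = a + b := by
  obtain ⟨m, rfl⟩ := Int.eq_ofNat_of_zero_le ha
  obtain ⟨n, rfl⟩ := Int.eq_ofNat_of_zero_le hb
  have hd' : 2^k ∣ m := by exact_mod_cast hd
  have hlt' : n < 2^k := by exact_mod_cast hlt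
  obtain ⟨q, rfl⟩ := hd'
  have hs : 2^k * q = q <<< k := by rw [Nat.shiftLeft_eq]; ring
  rw [hs, PySem.Int.bor_natCast, lor_two_pow_add k q n hlt']
  push_cast; ring

theorem band31 {c : Int} (h0 : 0 ≤ c) (h1 : c < 32) : PySem.Int.band c 31 = c := by
  interval_cases c <;> decide

theorem band15 {c : Int} (h0 : 0 ≤ c) (h1 : c < 32) : PySem.Int.band c 15 = PySem.Int.mod c 16 := by
  interval_cases c <;> decide

theorem mul_pow_lt {c : Int} (m : Nat) (h : c < 32) : c * (2:Int)^m < (2:Int)^(m+5) := by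
  calc c * (2:Int)^m < 32 * (2:Int)^m := mul_lt_mul_of_pos_right h (by positivity)
    _ = (2:Int)^(m+5) := by rw [pow_add]; ring

theorem key (d0 d1 d2 d3 d4 d5 d6 d7 d8 d9 d10 d11 d12 : Int)
    (h0 : 0 ≤ d0 ∧ d0 < 32)
    (h1 : 0 ≤ d1 ∧ d1 < 32)
    (h2 : 0 ≤ d2 ∧ d2 < 32)
    (h3 : 0 ≤ d3 ∧ d3 < 32)
    (h4 : 0 ≤ d4 ∧ d4 < 32)
    (h5 : 0 ≤ d5 ∧ d5 < 32)
    (h6 : 0 ≤ d6 ∧ d6 < 32)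
    (h7 : 0 ≤ d7 ∧ d7 < 32)
    (h8 : 0 ≤ d8 ∧ d8 < 32)
    (h9 : 0 ≤ d9 ∧ d9 < 32)
    (h10 : 0 ≤ d10 ∧ d10 < 32)
    (h11 : 0 ≤ d11 ∧ d11 < 32)
    (h12 : 0 ≤ d12 ∧ d12 < 32) :
    PySem.Int.bor (PySem.Int.bor (PySem.Int.bor (PySem.Int.bor (PySem.Int.bor (PySem.Int.bor (PySem.Int.bor (PySem.Int.bor (PySem.Int.bor (PySem.Int.bor (PySem.Int.bor (PySem.Int.bor (PySem.Int.bor 0 (PySem.Int.band d0 31 <<< (59:Nat))) (PySem.Int.band d1 31 <<< (54:Nat))) (PySem.Int.band d2 31 <<< (49:Nat))) (PySem.Int.band d3 31 <<< (44:Nat))) (PySem.Int.band d4 31 <<< (39:Nat))) (PySem.Int.band d5 31 <<< (34:Nat))) (PySem.Int.band d6 31 <<< (29:Nat))) (PySem.Int.band d7 31 <<< (24:Nat))) (PySem.Int.band d8 31 <<< (19:Nat))) (PySem.Int.band d9 31 <<< (14:Nat))) (PySem.Int.band d10 31 <<< (9:Nat))) (PySem.Int.band d11 31 <<< (4:Nat)))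 (PySem.Int.band d12 15) = ((((((((((((0 + d0) * 32 + d1) * 32 + d2) * 32 + d3) * 32 + d4) * 32 + d5) * 32 + d6) * 32 + d7) * 32 + d8) * 32 + d9) * 32 + d10) * 32 + d11) * 16 + PySem.Int.mod d12 16 := by
  rw [band31 h0.1 h0.2, band31 h1.1 h1.2, band31 h2.1 h2.2, band31 h3.1 h3.2, band31 h4.1 h4.2, band31 h5.1 h5.2, band31 h6.1 h6.2, band31 h7.1 h7.2, band31 h8.1 h8.2, band31 h9.1 h9.2, band31 h10.1 h10.2, band31 h11.1 h11.2, band15 h12.1 h12.2]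
  simp only [Int.shiftLeft_eq]
  rw [show PySem.Int.bor 0 (d0 * (2:Int)^(59:Nat)) = d0 * (2:Int)^(59:Nat) by rw [PySem.Int.bor_comm]; simp]
  have nn0 : 0 ≤ d0 * (2:Int)^(59:Nat) := mul_nonneg h0.1 (by positivity)
  have nn1 : 0 ≤ d1 * (2:Int)^(54:Nat) := mul_nonneg h1.1 (by positivity)
  have nn2 : 0 ≤ d2 * (2:Int)^(49:Nat) := mul_nonneg h2.1 (by positivity)
  have nn3 : 0 ≤ d3 * (2:Int)^(44:Nat) := mul_nonneg h3.1 (by positivity)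
  have nn4 : 0 ≤ d4 * (2:Int)^(39:Nat) := mul_nonneg h4.1 (by positivity)
  have nn5 : 0 ≤ d5 * (2:Int)^(34:Nat) := mul_nonneg h5.1 (by positivity)
  have nn6 : 0 ≤ d6 * (2:Int)^(29:Nat) := mul_nonneg h6.1 (by positivity)
  have nn7 : 0 ≤ d7 * (2:Int)^(24:Nat) := mul_nonneg h7.1 (by positivity)
  have nn8 : 0 ≤ d8 * (2:Int)^(19:Nat) := mul_nonneg h8.1 (by positivity)
  have nn9 : 0 ≤ d9 * (2:Int)^(14:Nat) := mul_nonneg h9.1 (by positivity)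
  have nn10 : 0 ≤ d10 * (2:Int)^(9:Nat) := mul_nonneg h10.1 (by positivity)
  have nn11 : 0 ≤ d11 * (2:Int)^(4:Nat) := mul_nonneg h11.1 (by positivity)
  have e1 : PySem.Int.bor (d0 * (2:Int)^(59:Nat)) (d1 * (2:Int)^(54:Nat)) = d0 * (2:Int)^(59:Nat) + d1 * (2:Int)^(54:Nat) :=
    orle _ _ 59 (nn0) nn1 ⟨d0 * (2:Int)^(0:Nat), by ring⟩ (mul_pow_lt 54 h1.2)
  have e2 : PySem.Int.bor (d0 * (2:Int)^(59:Nat) + d1 * (2:Int)^(54:Nat)) (d2 * (2:Int)^(49:Nat)) = d0 * (2:Int)^(59:Nat) + d1 * (2:Int)^(54:Nat) + d2 * (2:Int)^(49:Nat) :=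
    orle _ _ 54 ((add_nonneg nn0 nn1)) nn2 ⟨d0 * (2:Int)^(5:Nat) + d1 * (2:Int)^(0:Nat), by ring⟩ (mul_pow_lt 49 h2.2)
  have e3 : PySem.Int.bor (d0 * (2:Int)^(59:Nat) + d1 * (2:Int)^(54:Nat) + d2 * (2:Int)^(49:Nat)) (d3 * (2:Int)^(44:Nat)) = d0 * (2:Int)^(59:Nat) + d1 * (2:Int)^(54:Nat) + d2 * (2:Int)^(49:Nat) + d3 * (2:Int)^(44:Nat) :=
    orle _ _ 49 ((add_nonneg (add_nonneg nn0 nn1) nn2)) nn3 ⟨d0 * (2:Int)^(10:Nat) + d1 * (2:Int)^(5:Nat) + d2 * (2:Int)^(0:Nat), by ring⟩ (mul_pow_lt 44 h3.2)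
  have e4 : PySem.Int.bor (d0 * (2:Int)^(59:Nat) + d1 * (2:Int)^(54:Nat) + d2 * (2:Int)^(49:Nat) + d3 * (2:Int)^(44:Nat)) (d4 * (2:Int)^(39:Nat)) = d0 * (2:Int)^(59:Nat) + d1 * (2:Int)^(54:Nat) + d2 * (2:Int)^(49:Nat) + d3 * (2:Int)^(44:Nat) + d4 * (2:Int)^(39:Nat) :=
    orle _ _ 44 ((add_nonneg (add_nonneg (add_nonneg nn0 nn1) nn2) nn3)) nn4 ⟨d0 * (2:Int)^(15:Nat) + d1 * (2:Int)^(10:Nat) + d2 * (2:Int)^(5:Nat) + d3 * (2:Int)^(0:Nat), by ring⟩ (mul_pow_lt 39 h4.2)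
  have e5 : PySem.Int.bor (d0 * (2:Int)^(59:Nat) + d1 * (2:Int)^(54:Nat) + d2 * (2:Int)^(49:Nat) + d3 * (2:Int)^(44:Nat) + d4 * (2:Int)^(39:Nat)) (d5 * (2:Int)^(34:Nat)) = d0 * (2:Int)^(59:Nat) + d1 * (2:Int)^(54:Nat) + d2 * (2:Int)^(49:Nat) + d3 * (2:Int)^(44:Nat) + d4 * (2:Int)^(39:Nat) + d5 * (2:Int)^(34:Nat) :=
    orle _ _ 39 ((add_nonneg (add_nonneg (add_nonneg (add_nonneg nn0 nn1) nn2) nn3) nn4)) nn5 ⟨d0 * (2:Int)^(20:Nat) + d1 * (2:Int)^(15:Nat) + d2 * (2:Int)^(10:Nat) + d3 * (2:Int)^(5:Nat) + d4 * (2:Int)^(0:Nat), by ring⟩ (mul_pow_lt 34 h5.2)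
  have e6 : PySem.Int.bor (d0 * (2:Int)^(59:Nat) + d1 * (2:Int)^(54:Nat) + d2 * (2:Int)^(49:Nat) + d3 * (2:Int)^(44:Nat) + d4 * (2:Int)^(39:Nat) + d5 * (2:Int)^(34:Nat)) (d6 * (2:Int)^(29:Nat)) = d0 * (2:Int)^(59:Nat) + d1 * (2:Int)^(54:Nat) + d2 * (2:Int)^(49:Nat) + d3 * (2:Int)^(44:Nat) + d4 * (2:Int)^(39:Nat) + d5 * (2:Int)^(34:Nat) + d6 * (2:Int)^(29:Nat) :=
    orle _ _ 34 ((add_nonneg (add_nonneg (add_nonneg (add_nonneg (add_nonneg nn0 nn1) nn2) nn3) nn4) nn5)) nn6 ⟨d0 * (2:Int)^(25:Nat) + d1 * (2:Int)^(20:Nat) + d2 * (2:Int)^(15:Nat) + d3 * (2:Int)^(10:Nat) + d4 * (2:Int)^(5:Nat) + d5 * (2:Int)^(0:Nat), by ring⟩ (mul_pow_lt 29 h6.2)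
  have e7 : PySem.Int.bor (d0 * (2:Int)^(59:Nat) + d1 * (2:Int)^(54:Nat) + d2 * (2:Int)^(49:Nat) + d3 * (2:Int)^(44:Nat) + d4 * (2:Int)^(39:Nat) + d5 * (2:Int)^(34:Nat) + d6 * (2:Int)^(29:Nat)) (d7 * (2:Int)^(24:Nat)) = d0 * (2:Int)^(59:Nat) + d1 * (2:Int)^(54:Nat) + d2 * (2:Int)^(49:Nat) + d3 * (2:Int)^(44:Nat) + d4 * (2:Int)^(39:Nat) + d5 * (2:Int)^(34:Nat) + d6 * (2:Int)^(29:Nat) + d7 * (2:Int)^(24:Nat) :=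
    orle _ _ 29 ((add_nonneg (add_nonneg (add_nonneg (add_nonneg (add_nonneg (add_nonneg nn0 nn1) nn2) nn3) nn4) nn5) nn6)) nn7 ⟨d0 * (2:Int)^(30:Nat) + d1 * (2:Int)^(25:Nat) + d2 * (2:Int)^(20:Nat) + d3 * (2:Int)^(15:Nat) + d4 * (2:Int)^(10:Nat) + d5 * (2:Int)^(5:Nat) + d6 * (2:Int)^(0:Nat), by ring⟩ (mul_pow_lt 24 h7.2)
  have e8 : PySem.Int.bor (d0 * (2:Int)^(59:Nat) + d1 * (2:Int)^(54:Nat) + d2 * (2:Int)^(49:Nat) + d3 * (2:Int)^(44:Nat) + d4 * (2:Int)^(39:Nat) + d5 * (2:Int)^(34:Nat) + d6 * (2:Int)^(29:Nat) + d7 * (2:Int)^(24:Nat)) (d8 * (2:Int)^(19:Nat)) = d0 * (2:Int)^(59:Nat) + d1 * (2:Int)^(54:Nat) + d2 * (2:Int)^(49:Nat) + d3 * (2:Int)^(44:Nat) + d4 * (2:Int)^(39:Nat) + d5 * (2:Int)^(34:Nat) + d6 * (2:Int)^(29:Nat) + d7 * (2:Int)^(24:Nat) + d8 * (2:Int)^(19:Nat)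 :=
    orle _ _ 24 ((add_nonneg (add_nonneg (add_nonneg (add_nonneg (add_nonneg (add_nonneg (add_nonneg nn0 nn1) nn2) nn3) nn4) nn5) nn6) nn7)) nn8 ⟨d0 * (2:Int)^(35:Nat) + d1 * (2:Int)^(30:Nat) + d2 * (2:Int)^(25:Nat) + d3 * (2:Int)^(20:Nat) + d4 * (2:Int)^(15:Nat) + d5 * (2:Int)^(10:Nat) + d6 * (2:Int)^(5:Nat) + d7 * (2:Int)^(0:Nat), by ring⟩ (mul_pow_lt 19 h8.2)
  have e9 : PySem.Int.bor (d0 * (2:Int)^(59:Nat) + d1 * (2:Int)^(54:Nat) + d2 * (2:Int)^(49:Nat) + d3 * (2:Int)^(44:Nat) + d4 * (2:Int)^(39:Nat) + d5 * (2:Int)^(34:Nat) + d6 * (2:Int)^(29:Nat) + d7 * (2:Int)^(24:Nat) + d8 * (2:Int)^(19:Nat)) (d9 * (2:Int)^(14:Nat)) = d0 * (2:Int)^(59:Nat) + d1 * (2:Int)^(54:Nat) + d2 * (2:Int)^(49:Nat) + d3 * (2:Int)^(44:Nat) + d4 * (2:Int)^(39:Nat) + d5 * (2:Int)^(34:Nat)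 + d6 * (2:Int)^(29:Nat) + d7 * (2:Int)^(24:Nat) + d8 * (2:Int)^(19:Nat) + d9 * (2:Int)^(14:Nat) :=
    orle _ _ 19 ((add_nonneg (add_nonneg (add_nonneg (add_nonneg (add_nonneg (add_nonneg (add_nonneg (add_nonneg nn0 nn1) nn2) nn3) nn4) nn5) nn6) nn7) nn8)) nn9 ⟨d0 * (2:Int)^(40:Nat) + d1 * (2:Int)^(35:Nat) + d2 * (2:Int)^(30:Nat) + d3 * (2:Int)^(25:Nat) + d4 * (2:Int)^(20:Nat) + d5 * (2:Int)^(15:Nat) + d6 * (2:Int)^(10:Nat) + d7 * (2:Int)^(5:Nat) + d8 * (2:Int)^(0:Nat), by ring⟩ (mul_pow_lt 14 h9.2)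
  have e10 : PySem.Int.bor (d0 * (2:Int)^(59:Nat) + d1 * (2:Int)^(54:Nat) + d2 * (2:Int)^(49:Nat) + d3 * (2:Int)^(44:Nat) + d4 * (2:Int)^(39:Nat) + d5 * (2:Int)^(34:Nat) + d6 * (2:Int)^(29:Nat) + d7 * (2:Int)^(24:Nat) + d8 * (2:Int)^(19:Nat) + d9 * (2:Int)^(14:Nat)) (d10 * (2:Int)^(9:Nat)) = d0 * (2:Int)^(59:Nat) + d1 * (2:Int)^(54:Nat) + d2 * (2:Int)^(49:Nat) + d3 * (2:Int)^(44:Nat) + d4 * (2:Int)^(39:Nat) + d5 * (2:Int)^(34:Nat) + d6 * (2:Int)^(29:Nat) + d7 * (2:Int)^(24:Nat) + d8 * (2:Int)^(19:Nat) + d9 * (2:Int)^(14:Nat) + d10 * (2:Int)^(9:Nat) :=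
    orle _ _ 14 ((add_nonneg (add_nonneg (add_nonneg (add_nonneg (add_nonneg (add_nonneg (add_nonneg (add_nonneg (add_nonneg nn0 nn1) nn2) nn3) nn4) nn5) nn6) nn7) nn8) nn9)) nn10 ⟨d0 * (2:Int)^(45:Nat) + d1 * (2:Int)^(40:Nat) + d2 * (2:Int)^(35:Nat) + d3 * (2:Int)^(30:Nat) + d4 * (2:Int)^(25:Nat) + d5 * (2:Int)^(20:Nat) + d6 * (2:Int)^(15:Nat) + d7 * (2:Int)^(10:Nat) + d8 * (2:Int)^(5:Nat) + d9 * (2:Int)^(0:Nat), by ring⟩ (mul_pow_lt 9 h10.2)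
  have e11 : PySem.Int.bor (d0 * (2:Int)^(59:Nat) + d1 * (2:Int)^(54:Nat) + d2 * (2:Int)^(49:Nat) + d3 * (2:Int)^(44:Nat) + d4 * (2:Int)^(39:Nat) + d5 * (2:Int)^(34:Nat) + d6 * (2:Int)^(29:Nat) + d7 * (2:Int)^(24:Nat) + d8 * (2:Int)^(19:Nat) + d9 * (2:Int)^(14:Nat) + d10 * (2:Int)^(9:Nat)) (d11 * (2:Int)^(4:Nat)) = d0 * (2:Int)^(59:Nat) + d1 * (2:Int)^(54:Nat) + d2 * (2:Int)^(49:Nat) + d3 * (2:Int)^(44:Nat) + d4 * (2:Int)^(39:Nat) + d5 * (2:Int)^(34:Nat) + d6 * (2:Int)^(29:Nat) + d7 * (2:Int)^(24:Nat) + d8 * (2:Int)^(19:Nat) + d9 * (2:Int)^(14:Nat) + d10 * (2:Int)^(9:Nat) + d11 * (2:Int)^(4:Nat) :=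
    orle _ _ 9 ((add_nonneg (add_nonneg (add_nonneg (add_nonneg (add_nonneg (add_nonneg (add_nonneg (add_nonneg (add_nonneg (add_nonneg nn0 nn1) nn2) nn3) nn4) nn5) nn6) nn7) nn8) nn9) nn10)) nn11 ⟨d0 * (2:Int)^(50:Nat) + d1 * (2:Int)^(45:Nat) + d2 * (2:Int)^(40:Nat) + d3 * (2:Int)^(35:Nat) + d4 * (2:Int)^(30:Nat) + d5 * (2:Int)^(25:Nat) + d6 * (2:Int)^(20:Nat) + d7 * (2:Int)^(15:Nat) + d8 * (2:Int)^(10:Nat) + d9 * (2:Int)^(5:Nat) + d10 * (2:Int)^(0:Nat), by ring⟩ (mul_pow_lt 4 h11.2)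
  have e12 : PySem.Int.bor (d0 * (2:Int)^(59:Nat) + d1 * (2:Int)^(54:Nat) + d2 * (2:Int)^(49:Nat) + d3 * (2:Int)^(44:Nat) + d4 * (2:Int)^(39:Nat) + d5 * (2:Int)^(34:Nat) + d6 * (2:Int)^(29:Nat) + d7 * (2:Int)^(24:Nat) + d8 * (2:Int)^(19:Nat) + d9 * (2:Int)^(14:Nat) + d10 * (2:Int)^(9:Nat) + d11 * (2:Int)^(4:Nat)) (PySem.Int.mod d12 16) = d0 * (2:Int)^(59:Nat) + d1 * (2:Int)^(54:Nat) + d2 * (2:Int)^(49:Nat) + d3 * (2:Int)^(44:Nat) + d4 * (2:Int)^(39:Nat) + d5 * (2:Int)^(34:Nat) + d6 * (2:Int)^(29:Nat) + d7 * (2:Int)^(24:Nat) + d8 * (2:Int)^(19:Nat) + d9 * (2:Int)^(14:Nat) + d10 * (2:Int)^(9:Nat) + d11 * (2:Int)^(4:Nat) + PySem.Int.mod d12 16 :=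
    orle _ _ 4 ((add_nonneg (add_nonneg (add_nonneg (add_nonneg (add_nonneg (add_nonneg (add_nonneg (add_nonneg (add_nonneg (add_nonneg (add_nonneg nn0 nn1) nn2) nn3) nn4) nn5) nn6) nn7) nn8) nn9) nn10) nn11)) (PySem.Int.mod_nonneg d12 (by norm_num)) ⟨d0 * (2:Int)^(55:Nat) + d1 * (2:Int)^(50:Nat) + d2 * (2:Int)^(45:Nat) + d3 * (2:Int)^(40:Nat) + d4 * (2:Int)^(35:Nat) + d5 * (2:Int)^(30:Nat) + d6 * (2:Int)^(25:Nat) + d7 * (2:Int)^(20:Nat) + d8 * (2:Int)^(15:Nat) + d9 * (2:Int)^(10:Nat) + d10 * (2:Int)^(5:Nat) + d11 * (2:Int)^(0:Nat), by ring⟩ (lt_of_lt_of_le (PySem.Int.mod_lt d12 (by norm_num)) (by norm_num))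
  rw [e1, e2, e3, e4, e5, e6, e7, e8, e9, e10, e11, e12]
  ring

-- B-side: table lookup agrees with A's range-test helper on every char below code 128
set_option maxRecDepth 10000 in
theorem digit_eq (ch : Char) (h : ch.toNat < 128) :
    PySem.Dict.getD symTable ch 0 = charToSymbolA ch := by
  have hall : ∀ n : Fin 128, PySem.Dict.getD symTable (Char.ofNat n.val) 0 = charToSymbolA (Char.ofNat n.val) := by decide
  have h2 : Char.ofNat ch.toNat = ch := Char.ofNat_toNat ch
  rw [← h2]
  exact hall ⟨ch.toNat, h⟩

-- base-2 parse of a bit string: prepending an accumulator shifts it by the length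
theorem parse_shift (ys : List Char) (a : Int) :
    List.foldl (fun acc ch => acc * 2 + (if ch == '1' then (1 : Int) else 0)) a ys
    = a * 2 ^ ys.length + List.foldl (fun acc ch => acc * 2 + (if ch == '1' then (1 : Int) else 0)) 0 ys := by
  induction ys generalizing a with
  | nil => simp
  | cons y ys ih =>
    simp only [List.foldl_cons, List.length_cons]
    rw [ih (a * 2 + _), ih (0 * 2 + _)]
    rw [pow_succ]
    ring

theorem fmt5val (d : Int) (h0 : 0 ≤ d) (h1 : d < 32) :
    (fmtBin 5 d).length = 5 ∧
    List.foldl (fun acc ch => acc * 2 + (if ch == '1' then (1 : Int) else 0)) 0 (fmtBin 5 d) = d := by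
  interval_cases d <;> exact ⟨by decide, by decide⟩

theorem fmt4val (d : Int) (h0 : 0 ≤ d) (h1 : d < 16) :
    (fmtBin 4 d).length = 4 ∧
    List.foldl (fun acc ch => acc * 2 + (if ch == '1' then (1 : Int) else 0)) 0 (fmtBin 4 d) = d := by
  interval_cases d <;> exact ⟨by decide, by decide⟩

theorem step5 (X : List Char) (d : Int) (h0 : 0 ≤ d) (h1 : d < 32) :
    List.foldl (fun acc ch => acc * 2 + (if ch == '1' then (1 : Int) else 0)) 0 (X ++ fmtBin 5 d)
    = List.foldl (fun acc ch => acc * 2 + (if ch == '1' then (1 : Int) else 0)) 0 X * 32 + d := by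
  rw [List.foldl_append, parse_shift, (fmt5val d h0 h1).1, (fmt5val d h0 h1).2]
  norm_num

theorem step4 (X : List Char) (d : Int) (h0 : 0 ≤ d) (h1 : d < 16) :
    List.foldl (fun acc ch => acc * 2 + (if ch == '1' then (1 : Int) else 0)) 0 (X ++ fmtBin 4 d)
    = List.foldl (fun acc ch => acc * 2 + (if ch == '1' then (1 : Int) else 0)) 0 X * 16 + d := by
  rw [List.foldl_append, parse_shift, (fmt4val d h0 h1).1, (fmt4val d h0 h1).2]
  norm_num

-- the padded 13-char list, element by element
theorem pad13 (cs : List Char) :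
    PySem.List.slice (cs ++ List.replicate 13 '.') none (some (13:Int))
    = [(cs ++ List.replicate 13 '.').getD 0 '.', (cs ++ List.replicate 13 '.').getD 1 '.',
       (cs ++ List.replicate 13 '.').getD 2 '.', (cs ++ List.replicate 13 '.').getD 3 '.',
       (cs ++ List.replicate 13 '.').getD 4 '.', (cs ++ List.replicate 13 '.').getD 5 '.',
       (cs ++ List.replicate 13 '.').getD 6 '.', (cs ++ List.replicate 13 '.').getD 7 '.',
       (cs ++ List.replicate 13 '.').getD 8 '.', (cs ++ List.replicate 13 '.').getD 9 '.',
       (cs ++ List.replicate 13 '.').getD 10 '.', (cs ++ List.replicate 13 '.').getD 11 '.',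
       (cs ++ List.replicate 13 '.').getD 12 '.'] := by
  rw [PySem.List.slice_to _ (by norm_num)]
  have hlen : (cs ++ List.replicate 13 '.').length = cs.length + 13 := by simp
  apply List.ext_getElem
  · simp [List.length_take]
  · intro i h1 h2
    have hi : i < 13 := by simpa [List.length_take, hlen] using h1
    have hil : i < (cs ++ List.replicate 13 '.').length := by omega
    rw [List.getElem_take]
    interval_cases i <;> simp [List.getD]

theorem digit_bridge (cs : List Char) (i : Int) (j : Nat) (hij : i = (j:Int)) (_hj : j < 13) :
    (if i < ((cs.length : Int)) then charToSymbolA (PySem.List.pyGetD cs i 'a') else 0)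
    = charToSymbolA ((cs ++ List.replicate 13 '.').getD j '.') := by
  subst hij
  by_cases h : j < cs.length
  · have h' : ((j:Int)) < (cs.length : Int) := by exact_mod_cast h
    rw [if_pos h', PySem.List.pyGetD_natCast]
    rw [List.getD_append _ _ _ _ h]
    rw [List.getD_eq_getElem _ _ h, List.getD_eq_getElem _ _ h]
  · have h' : ¬(((j:Nat):Int) < (cs.length : Int)) := by exact_mod_cast h
    rw [if_neg h', List.getD_append_right _ _ _ _ (by omega)]
    have hr : (List.replicate 13 '.').getD (j - cs.length) '.' = '.' := by
      simp only [List.getD, List.getElem?_replicate]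
      split <;> rfl
    rw [hr]
    decide

theorem slice12 (a0 a1 a2 a3 a4 a5 a6 a7 a8 a9 a10 a11 a12 : Char) :
    PySem.List.slice [a0,a1,a2,a3,a4,a5,a6,a7,a8,a9,a10,a11,a12] none (some (12:Int))
    = [a0,a1,a2,a3,a4,a5,a6,a7,a8,a9,a10,a11] := by
  rw [PySem.List.slice_to _ (by norm_num)]
  rfl

theorem get12 (a0 a1 a2 a3 a4 a5 a6 a7 a8 a9 a10 a11 a12 : Char) :
    PySem.List.pyGetD [a0,a1,a2,a3,a4,a5,a6,a7,a8,a9,a10,a11,a12] (12:Int) '.' = a12 := by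
  rfl

theorem N_eq (name : String) (hdom : Dom_N name) : N name = N_alt name := by
  have h128 : ∀ c ∈ name.toList, c.toNat < 128 := by
    intro c hc
    unfold Dom_N pvDomStr at hdom
    have hc2 := List.all_eq_true.mp hdom c hc
    unfold pvDomChar at hc2
    simp at hc2
    omega
  have hE : ∀ j : Nat, ((name.toList ++ List.replicate 13 '.').getD j '.').toNat < 128 := by
    intro j
    by_cases hj : j < (name.toList ++ List.replicate 13 '.').length
    · have hm : (name.toList ++ List.replicate 13 '.').getD j '.' ∈ name.toList ++ List.replicate 13 '.' := by
        rw [List.getD_eq_getElem _ _ hj]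
        exact List.getElem_mem _
      rcases List.mem_append.mp hm with h | h
      · exact h128 _ h
      · rw [List.eq_of_mem_replicate h]
        decide
    · rw [List.getD_eq_default _ _ (by omega)]
      decide
  have hr13 : PySem.List.pyRange 0 13 1 = [0,1,2,3,4,5,6,7,8,9,10,11,12] := by decide
  unfold N N_alt
  dsimp only
  rw [pad13 name.toList, slice12, get12, hr13]
  simp only [List.foldl_cons, List.foldl_nil, List.nil_append, Int.reduceLE, and_true,
    Int.reduceLT, Int.reduceAdd, Int.reduceMul, Int.reduceSub, Int.reduceToNat,
    ite_true, ite_false]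
  rw [digit_eq _ (hE 0), digit_eq _ (hE 1), digit_eq _ (hE 2), digit_eq _ (hE 3),
      digit_eq _ (hE 4), digit_eq _ (hE 5), digit_eq _ (hE 6), digit_eq _ (hE 7),
      digit_eq _ (hE 8), digit_eq _ (hE 9), digit_eq _ (hE 10), digit_eq _ (hE 11),
      digit_eq _ (hE 12)]
  rw [step4 _ _ (PySem.Int.mod_nonneg _ (by norm_num)) (PySem.Int.mod_lt _ (by norm_num))]
  rw [step5 _ _ (charToSymbolA_bound _).1 (charToSymbolA_bound _).2,
      step5 _ _ (charToSymbolA_bound _).1 (charToSymbolA_bound _).2,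
      step5 _ _ (charToSymbolA_bound _).1 (charToSymbolA_bound _).2,
      step5 _ _ (charToSymbolA_bound _).1 (charToSymbolA_bound _).2,
      step5 _ _ (charToSymbolA_bound _).1 (charToSymbolA_bound _).2,
      step5 _ _ (charToSymbolA_bound _).1 (charToSymbolA_bound _).2,
      step5 _ _ (charToSymbolA_bound _).1 (charToSymbolA_bound _).2,
      step5 _ _ (charToSymbolA_bound _).1 (charToSymbolA_bound _).2,
      step5 _ _ (charToSymbolA_bound _).1 (charToSymbolA_bound _).2,
      step5 _ _ (charToSymbolA_bound _).1 (charToSymbolA_bound _).2,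
      step5 _ _ (charToSymbolA_bound _).1 (charToSymbolA_bound _).2]
  rw [(fmt5val _ (charToSymbolA_bound _).1 (charToSymbolA_bound _).2).2]
  rw [key _ _ _ _ _ _ _ _ _ _ _ _ _ (dbound _ _) (dbound _ _) (dbound _ _) (dbound _ _)
      (dbound _ _) (dbound _ _) (dbound _ _) (dbound _ _) (dbound _ _) (dbound _ _)
      (dbound _ _) (dbound _ _) (dbound _ _)]
  rw [digit_bridge name.toList 0 0 (by norm_num) (by norm_num),
      digit_bridge name.toList 1 1 (by norm_num) (by norm_num),
      digit_bridge name.toList 2 2 (by norm_num) (by norm_num),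
      digit_bridge name.toList 3 3 (by norm_num) (by norm_num),
      digit_bridge name.toList 4 4 (by norm_num) (by norm_num),
      digit_bridge name.toList 5 5 (by norm_num) (by norm_num),
      digit_bridge name.toList 6 6 (by norm_num) (by norm_num),
      digit_bridge name.toList 7 7 (by norm_num) (by norm_num),
      digit_bridge name.toList 8 8 (by norm_num) (by norm_num),
      digit_bridge name.toList 9 9 (by norm_num) (by norm_num),
      digit_bridge name.toList 10 10 (by norm_num) (by norm_num),
      digit_bridge name.toList 11 11 (by norm_num) (by norm_num),
      digit_bridge name.toList 12 12 (by norm_num) (by norm_num)]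
  ring

-- ===== VERDICT (by name: the statement is the Claim_ definition above) =====
theorem N_spec : Claim_equal_N := by
  intro name hdom
  exact N_eq name hdom
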